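-- pv_equiv track=rewrite | github.com/KodCode-AI/kodcode | demo/SFT_KodCode_leetcode_100_1741214688/cross_verification_SFT_KodCode_leetcode_100_1741214688/Leetcode_00000049_C/trial_r1_1/solution.py | shortest_subarray_with_sum_at_least_target
-- ===== SOURCE A (Python) =====
-- from typing import List
-- from collections import deque
--
-- def shortest_subarray_with_sum_at_least_target(nums: List[int], target: int) -> int:
--     # Check if any single element meets or exceeds the target
--     for num in nums:
--         if num >= target:
--             return 1
--
--     # Compute the prefix sum array
--     prefix = [0]
--     for num in nums:
--         prefix.append(prefix[-1] + num)
--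
--     min_length = float('inf')
--     dq = deque()
--     dq.append(0)  # Initialize the deque with the first index
--
--     for j in range(1, len(prefix)):
--         # Check if the current prefix sum minus the front of the deque meets the target
--         while dq and prefix[j] - prefix[dq[0]] >= target:
--             current_length = j - dq.popleft()
--             if current_length < min_length:
--                 min_length = current_length
--
--         # Maintain the deque to ensure it's in increasing order of prefix sums
--         while dq and prefix[j] <= prefix[dq[-1]]:
--             dq.pop()
--
--         dq.append(j)
--
--     if min_length != float('inf'):
--         return min_length
--     else:
--         return 0
-- ===== SOURCE B (Python) =====
-- def shortest_subarray_with_sum_at_least_target(nums, target):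
--     n = len(nums)
--     for length in range(1, n + 1):
--         for start in range(n - length + 1):
--             if sum(nums[start:start + length]) >= target:
--                 return length
--     return 0
-- ===== Notes on version B (the rewrite author's own statement) =====
-- stated objective: simpler
-- what changed: Replaced the prefix-sum + monotonic-deque single pass by a plain brute-force scan over candidate lengths 1..n returning the first length for which some window reaches the target (that first length is by construction the minimum).
import Mathlib
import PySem

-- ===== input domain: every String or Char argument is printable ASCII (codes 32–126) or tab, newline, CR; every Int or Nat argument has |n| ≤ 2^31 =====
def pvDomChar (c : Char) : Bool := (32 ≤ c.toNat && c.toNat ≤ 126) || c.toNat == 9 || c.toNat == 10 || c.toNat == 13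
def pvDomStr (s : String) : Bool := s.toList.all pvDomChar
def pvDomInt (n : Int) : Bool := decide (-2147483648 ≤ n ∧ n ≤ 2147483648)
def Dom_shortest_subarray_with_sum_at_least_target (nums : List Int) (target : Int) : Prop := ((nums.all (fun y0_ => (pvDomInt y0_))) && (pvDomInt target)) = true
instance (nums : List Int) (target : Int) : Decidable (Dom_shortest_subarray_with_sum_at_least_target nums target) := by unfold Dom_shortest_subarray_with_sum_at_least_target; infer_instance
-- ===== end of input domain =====

-- B replaces the prefix-sum + monotonic-deque pass by a brute-force scan over candidate
-- lengths (simpler, not faster); return values only (neither version mutates its input).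

-- ===== PORT A =====
-- prefix = [0]; for num in nums: prefix.append(prefix[-1] + num)
def pvPrefix (nums : List Int) : List Int :=
  nums.foldl (fun pr num => pr ++ [PySem.List.pyGetD pr (-1) 0 + num]) [0]

-- if current_length < min_length: min_length = current_length   (None = float('inf'))
def pvMinUpd (m : Option Nat) (c : Nat) : Option Nat :=
  match m with
  | none => some c
  | some v => if c < v then some c else some v

-- while dq and prefix[j] - prefix[dq[0]] >= target: record j - dq.popleft()
def pvFrontPop (pr : List Int) (target : Int) (j : Nat) :
    List Nat → Option Nat → List Nat × Option Nat
  | [], m => ([], m)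
  | i :: rest, m =>
    if pr.getD j 0 - pr.getD i 0 ≥ target then
      pvFrontPop pr target j rest (pvMinUpd m (j - i))
    else (i :: rest, m)

-- while dq and prefix[j] <= prefix[dq[-1]]: dq.pop()
def pvBackPop (pr : List Int) (j : Nat) (dq : List Nat) : List Nat :=
  if h : dq = [] then dq
  else if pr.getD j 0 ≤ pr.getD (dq.getLast h) 0 then pvBackPop pr j dq.dropLast
  else dq
termination_by dq.length
decreasing_by
  have := List.length_pos_of_ne_nil h
  simp [List.length_dropLast]; omega

-- one iteration of the 'for j in range(1, len(prefix))' loop; state = (min_length, dq)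
def pvStep (pr : List Int) (target : Int) (st : Option Nat × List Nat) (j : Nat) :
    Option Nat × List Nat :=
  let fp := pvFrontPop pr target j st.2 st.1
  let dq2 := pvBackPop pr j fp.1
  (fp.2, dq2 ++ [j])

def shortest_subarray_with_sum_at_least_target (nums : List Int) (target : Int) : Int :=
  if nums.any (fun num => decide (num ≥ target)) then 1
  else
    let pr := pvPrefix nums
    let st := (List.range' 1 (pr.length - 1)).foldl (pvStep pr target) (none, [0])
    match st.1 with
    | some m => (m : Int)
    | none => 0

-- ===== PORT B =====
-- any(sum(nums[start:start+length]) >= target for start in range(n - length + 1))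
def pvWindowAny (nums : List Int) (target : Int) (length : Nat) : Bool :=
  (List.range (nums.length - length + 1)).any
    (fun start =>
      decide ((PySem.List.slice nums (some (start : Int)) (some ((start : Int) + (length : Int)))).sum ≥ target))

-- 'for length in range(1, n+1)' with early return
def pvFindLen (nums : List Int) (target : Int) (length : Nat) : Int :=
  if length ≤ nums.length then
    if pvWindowAny nums target length then (length : Int)
    else pvFindLen nums target (length + 1)
  else 0
termination_by nums.length + 1 - length

def shortest_subarray_with_sum_at_least_target_alt (nums : List Int) (target : Int) : Int :=
  pvFindLen nums target 1

-- ===== PRECONDITION & SPEC =====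
def Spec_shortest_subarray_with_sum_at_least_target (nums : List Int) (target : Int) (out : Int) : Prop := out = shortest_subarray_with_sum_at_least_target_alt nums target
instance (nums : List Int) (target : Int) (out : Int) : Decidable (Spec_shortest_subarray_with_sum_at_least_target nums target out) := by unfold Spec_shortest_subarray_with_sum_at_least_target; infer_instance

-- ===== CLAIM (what is proved, stated in full; the proofs are below) =====
def Claim_equal_shortest_subarray_with_sum_at_least_target : Prop := ∀ (nums : List Int) (target : Int), Dom_shortest_subarray_with_sum_at_least_target nums target → Spec_shortest_subarray_with_sum_at_least_target nums target (shortest_subarray_with_sum_at_least_target nums target)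

-- ===== LEMMAS AND PROOFS =====

-- prefix sums, abstractly
def pvP (nums : List Int) (k : Nat) : Int := (nums.take k).sum

-- a valid (start-index, end-index) pair
def pvGood (nums : List Int) (t : Int) (i j : Nat) : Prop :=
  i < j ∧ j ≤ nums.length ∧ t ≤ pvP nums j - pvP nums i

-- loop invariant of A's deque pass after processing j = 1..J
def pvInv (nums : List Int) (t : Int) (J : Nat) (st : Option Nat × List Nat) : Prop :=
  st.2.Pairwise (· < ·) ∧
  st.2.Pairwise (fun a b => pvP nums a < pvP nums b) ∧
  (∀ i ∈ st.2, i ≤ J) ∧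
  (∀ v, st.1 = some v → ∃ i j, pvGood nums t i j ∧ j ≤ J ∧ v = j - i) ∧
  (∀ i j, pvGood nums t i j → j ≤ J → ∃ v, st.1 = some v ∧ v ≤ j - i) ∧
  (∀ i, i ≤ J → (∃ k ∈ st.2, i ≤ k ∧ pvP nums k ≤ pvP nums i) ∨
    ∃ k' j, i ≤ k' ∧ pvGood nums t k' j ∧ j ≤ J)

def pvPresums (c : Int) : List Int → List Int
  | [] => []
  | x :: xs => (c + x) :: pvPresums (c + x) xs

lemma pvPrefix_foldl (l : List Int) : ∀ (pr : List Int) (h : pr ≠ []),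
    l.foldl (fun pr num => pr ++ [PySem.List.pyGetD pr (-1) 0 + num]) pr
      = pr ++ pvPresums (pr.getLast h) l := by
  induction l with
  | nil => intro pr h; simp [pvPresums]
  | cons x xs ih =>
    intro pr h
    simp only [List.foldl_cons]
    rw [PySem.List.pyGetD_neg_one pr _ h, ih (pr ++ [pr.getLast h + x]) (by simp)]
    have hlast : (pr ++ [pr.getLast h + x]).getLast (by simp) = pr.getLast h + x := by
      simp
    rw [hlast]
    simp [pvPresums]

lemma pvPrefix_eq (nums : List Int) : pvPrefix nums = 0 :: pvPresums 0 nums := by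
  unfold pvPrefix
  rw [pvPrefix_foldl nums [0] (by simp)]
  simp

lemma pvPresums_length (c : Int) (l : List Int) : (pvPresums c l).length = l.length := by
  induction l generalizing c with
  | nil => rfl
  | cons x xs ih => simp [pvPresums, ih]

lemma pvPrefix_length (nums : List Int) : (pvPrefix nums).length = nums.length + 1 := by
  simp [pvPrefix_eq, pvPresums_length]

lemma pvPresums_getD (l : List Int) (c : Int) (k : Nat) (hk : k < l.length) :
    (pvPresums c l).getD k 0 = c + (l.take (k + 1)).sum := by
  induction l generalizing c k with
  | nil => simp at hk
  | cons x xs ih =>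
    cases k with
    | zero => simp [pvPresums]
    | succ k =>
      simp only [pvPresums, List.getD_cons_succ]
      rw [ih (c + x) k (by simpa using hk)]
      simp [List.take_succ_cons]; ring

lemma pvPrefix_getD (nums : List Int) (k : Nat) (hk : k ≤ nums.length) :
    (pvPrefix nums).getD k 0 = pvP nums k := by
  rw [pvPrefix_eq]
  cases k with
  | zero => simp [pvP]
  | succ k =>
    simp only [List.getD_cons_succ]
    rw [pvPresums_getD nums 0 k (by omega)]
    simp [pvP]

lemma pvMinUpd_spec (m : Option Nat) (c : Nat) :
    ∃ d, pvMinUpd m c = some d ∧ d ≤ c ∧ (∀ v, m = some v → d ≤ v) ∧ (m = some d ∨ d = c) := by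
  cases m with
  | none => exact ⟨c, rfl, le_refl c, by simp, Or.inr rfl⟩
  | some v =>
    by_cases h : c < v
    · refine ⟨c, by simp [pvMinUpd, h], le_refl c, ?_, Or.inr rfl⟩
      intro v' hv'; cases hv'; omega
    · refine ⟨v, by simp [pvMinUpd, h], by omega, ?_, Or.inl rfl⟩
      intro v' hv'; cases hv'; omega

lemma pvFrontPop_spec (pr : List Int) (t : Int) (j : Nat) (dq : List Nat) (m : Option Nat) :
    ∃ pre, dq = pre ++ (pvFrontPop pr t j dq m).1 ∧
      (∀ k ∈ pre, pr.getD j 0 - pr.getD k 0 ≥ t) ∧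
      (∀ k l, (pvFrontPop pr t j dq m).1 = k :: l → ¬ (pr.getD j 0 - pr.getD k 0 ≥ t)) ∧
      (∀ v, (pvFrontPop pr t j dq m).2 = some v → m = some v ∨ ∃ k ∈ pre, v = j - k) ∧
      (∀ v, m = some v → ∃ v', (pvFrontPop pr t j dq m).2 = some v' ∧ v' ≤ v) ∧
      (∀ k ∈ pre, ∃ v', (pvFrontPop pr t j dq m).2 = some v' ∧ v' ≤ j - k) := by
  induction dq generalizing m with
  | nil =>
    refine ⟨[], by simp [pvFrontPop], by simp, ?_, ?_, ?_, by simp⟩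
    · intro k l hkl; simp [pvFrontPop] at hkl
    · intro v hv; exact Or.inl (by simpa [pvFrontPop] using hv)
    · intro v hv; exact ⟨v, by simpa [pvFrontPop] using hv, le_rfl⟩
  | cons i rest ih =>
    by_cases hc : pr.getD j 0 - pr.getD i 0 ≥ t
    · have hstep : pvFrontPop pr t j (i :: rest) m
          = pvFrontPop pr t j rest (pvMinUpd m (j - i)) := by
        simp only [pvFrontPop]; rw [if_pos hc]
      obtain ⟨d, hd, hdc, hdm, hdor⟩ := pvMinUpd_spec m (j - i)
      obtain ⟨pre', heq, hcond, hhead, hsound, hmono, hbound⟩ := ih (pvMinUpd m (j - i))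
      refine ⟨i :: pre', by rw [hstep]; simpa using heq, ?_, ?_, ?_, ?_, ?_⟩
      · intro k hk
        rcases List.mem_cons.1 hk with h1 | h1
        · subst h1; exact hc
        · exact hcond k h1
      · intro k l hkl; rw [hstep] at hkl; exact hhead k l hkl
      · intro v hv
        rw [hstep] at hv
        rcases hsound v hv with h1 | ⟨k, hk, hvk⟩
        · rw [hd] at h1
          cases h1
          rcases hdor with h2 | h2
          · exact Or.inl h2
          · exact Or.inr ⟨i, List.mem_cons_self .., by omega⟩
        · exact Or.inr ⟨k, List.mem_cons_of_mem _ hk, hvk⟩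
      · intro v hv
        obtain ⟨v', hv', hle⟩ := hmono d hd
        rw [hstep]
        exact ⟨v', hv', le_trans hle (hdm v hv)⟩
      · intro k hk
        rw [hstep]
        rcases List.mem_cons.1 hk with h1 | h1
        · subst h1
          obtain ⟨v', hv', hle⟩ := hmono d hd
          exact ⟨v', hv', le_trans hle hdc⟩
        · exact hbound k h1
    · have hstep : pvFrontPop pr t j (i :: rest) m = (i :: rest, m) := by
        simp only [pvFrontPop]; rw [if_neg hc]
      refine ⟨[], by simp [hstep], by simp, ?_, ?_, ?_, by simp⟩
      · intro k l hkl
        rw [hstep] at hkl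
        cases hkl; simpa using hc
      · intro v hv; exact Or.inl (by simpa [hstep] using hv)
      · intro v hv; exact ⟨v, by simpa [hstep] using hv, le_rfl⟩

lemma pvBackPop_spec (pr : List Int) (j : Nat) (dq : List Nat) :
    ∃ suf, dq = pvBackPop pr j dq ++ suf ∧
      (∀ k ∈ suf, pr.getD j 0 ≤ pr.getD k 0) ∧
      (∀ k, (pvBackPop pr j dq).getLast? = some k → pr.getD k 0 < pr.getD j 0) := by
  by_cases hnil : dq = []
  · subst hnil
    refine ⟨[], by simp [pvBackPop], by simp, ?_⟩
    intro k hk; rw [show pvBackPop pr j [] = [] from by simp [pvBackPop]] at hk; simp at hk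
  · by_cases hc : pr.getD j 0 ≤ pr.getD (dq.getLast hnil) 0
    · have hstep : pvBackPop pr j dq = pvBackPop pr j dq.dropLast := by
        rw [pvBackPop, dif_neg hnil, if_pos hc]
      obtain ⟨suf', heq, hsuf, hlast⟩ := pvBackPop_spec pr j dq.dropLast
      refine ⟨suf' ++ [dq.getLast hnil], ?_, ?_, ?_⟩
      · rw [hstep, ← List.append_assoc, ← heq, List.dropLast_append_getLast hnil]
      · intro k hk
        rcases List.mem_append.1 hk with h1 | h1
        · exact hsuf k h1
        · rw [List.mem_singleton.1 h1]; exact hc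
      · intro k hk; rw [hstep] at hk; exact hlast k hk
    · have hstep : pvBackPop pr j dq = dq := by
        rw [pvBackPop, dif_neg hnil, if_neg hc]
      refine ⟨[], by simp [hstep], by simp, ?_⟩
      intro k hk
      rw [hstep, List.getLast?_eq_some_getLast hnil] at hk
      cases hk
      exact lt_of_not_ge (fun hge => hc (by omega))
termination_by dq.length
decreasing_by
  have := List.length_pos_of_ne_nil hnil
  simp [List.length_dropLast]; omega

lemma pvHead_le (f : Nat → Int) (k : Nat) (l : List Nat)
    (hp : (k :: l).Pairwise (fun a b => f a < f b)) (a : Nat) (ha : a ∈ k :: l) :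
    f k ≤ f a := by
  rcases List.mem_cons.1 ha with h | h
  · subst h; exact le_rfl
  · exact le_of_lt ((List.pairwise_cons.1 hp).1 a h)

lemma pvLe_getLast (f : Nat → Int) : ∀ (l : List Nat),
    l.Pairwise (fun a b => f a < f b) → ∀ (lk : Nat), l.getLast? = some lk →
    ∀ a ∈ l, f a ≤ f lk := by
  intro l
  induction l with
  | nil => simp
  | cons x xs ih =>
    intro hp lk hlk a ha
    cases xs with
    | nil =>
      simp at hlk ha
      subst hlk; subst ha; exact le_rfl
    | cons y ys =>
      rw [List.getLast?_cons_cons] at hlk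
      rcases List.mem_cons.1 ha with h1 | h1
      · subst h1
        have hmem : lk ∈ y :: ys := List.mem_of_getLast? hlk
        exact le_of_lt ((List.pairwise_cons.1 hp).1 lk hmem)
      · exact ih (List.pairwise_cons.1 hp).2 lk hlk a h1

lemma pvInv_step (nums : List Int) (t : Int) (J : Nat) (st : Option Nat × List Nat)
    (hJ : J < nums.length) (h : pvInv nums t J st) :
    pvInv nums t (J + 1) (pvStep (pvPrefix nums) t st (J + 1)) := by
  obtain ⟨hpw, hpwP, hle, hsound, hcomp, hcover⟩ := h
  set pr := pvPrefix nums with hpr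
  have hgd : ∀ k, k ≤ nums.length → pr.getD k 0 = pvP nums k := fun k hk => pvPrefix_getD nums k hk
  obtain ⟨pre, heq1, hcond, hhead, hsnd, hmono, hbnd⟩ := pvFrontPop_spec pr t (J + 1) st.2 st.1
  set dq1 := (pvFrontPop pr t (J + 1) st.2 st.1).1 with hdq1
  set m' := (pvFrontPop pr t (J + 1) st.2 st.1).2 with hm'
  obtain ⟨suf, heq2, hsuf, hlastlt⟩ := pvBackPop_spec pr (J + 1) dq1
  set dq2 := pvBackPop pr (J + 1) dq1 with hdq2
  have hstep : pvStep pr t st (J + 1) = (m', dq2 ++ [J + 1]) := rfl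
  -- memberships
  have hmem1 : ∀ k ∈ dq1, k ∈ st.2 := fun k hk => by
    rw [heq1]; exact List.mem_append_right _ hk
  have hmempre : ∀ k ∈ pre, k ∈ st.2 := fun k hk => by
    rw [heq1]; exact List.mem_append_left _ hk
  have hmem2 : ∀ k ∈ dq2, k ∈ dq1 := fun k hk => by
    rw [heq2]; exact List.mem_append_left _ hk
  have hmemsuf : ∀ k ∈ suf, k ∈ dq1 := fun k hk => by
    rw [heq2]; exact List.mem_append_right _ hk
  have hleJ : ∀ k ∈ st.2, k ≤ nums.length := fun k hk => le_trans (hle k hk) (by omega)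
  have hJ1 : J + 1 ≤ nums.length := by omega
  -- conditions in terms of pvP
  have hcondP : ∀ k ∈ pre, t ≤ pvP nums (J + 1) - pvP nums k := by
    intro k hk
    have := hcond k hk
    rwa [hgd (J + 1) hJ1, hgd k (hleJ k (hmempre k hk))] at this
  have hheadP : ∀ k l, dq1 = k :: l → pvP nums (J + 1) - pvP nums k < t := by
    intro k l hkl
    have h1 := hhead k l hkl
    have hkmem : k ∈ dq1 := by rw [hkl]; exact List.mem_cons_self ..
    rw [hgd (J + 1) hJ1, hgd k (hleJ k (hmem1 k hkmem))] at h1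
    omega
  have hsufP : ∀ k ∈ suf, pvP nums (J + 1) ≤ pvP nums k := by
    intro k hk
    have := hsuf k hk
    rwa [hgd (J + 1) hJ1, hgd k (hleJ k (hmem1 k (hmemsuf k hk)))] at this
  have hlastP : ∀ lk, dq2.getLast? = some lk → pvP nums lk < pvP nums (J + 1) := by
    intro lk hlk
    have := hlastlt lk hlk
    have hlkmem : lk ∈ dq2 := List.mem_of_getLast? hlk
    rwa [hgd (J + 1) hJ1, hgd lk (hleJ lk (hmem1 lk (hmem2 lk hlkmem)))] at this
  -- sublist facts
  have hsub1 : dq1.Sublist st.2 := by rw [heq1]; exact List.sublist_append_right _ _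
  have hsub2 : dq2.Sublist st.2 := by
    refine List.Sublist.trans ?_ hsub1
    rw [heq2]; exact List.sublist_append_left _ _
  have hpw2 : dq2.Pairwise (· < ·) := hpw.sublist hsub2
  have hpwP2 : dq2.Pairwise (fun a b => pvP nums a < pvP nums b) := hpwP.sublist hsub2
  have hpwP1 : dq1.Pairwise (fun a b => pvP nums a < pvP nums b) := hpwP.sublist hsub1
  rw [hstep]
  refine ⟨?_, ?_, ?_, ?_, ?_, ?_⟩
  · -- index pairwise
    rw [List.pairwise_append]
    refine ⟨hpw2, List.pairwise_singleton _ _, ?_⟩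
    intro a ha b hb
    rw [List.mem_singleton.1 hb]
    have := hle a (hmem1 a (hmem2 a ha))
    omega
  · -- prefix-value pairwise
    rw [List.pairwise_append]
    refine ⟨hpwP2, List.pairwise_singleton _ _, ?_⟩
    intro a ha b hb
    rw [List.mem_singleton.1 hb]
    rcases List.exists_mem_of_ne_nil dq2 (List.ne_nil_of_mem ha) with ⟨c, _⟩
    have hne : dq2 ≠ [] := List.ne_nil_of_mem ha
    obtain ⟨lk, hlk⟩ : ∃ lk, dq2.getLast? = some lk := by
      cases hgl : dq2.getLast? with
      | none => exact absurd (List.getLast?_eq_none_iff.1 hgl) hne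
      | some lk => exact ⟨lk, rfl⟩
    calc pvP nums a ≤ pvP nums lk := pvLe_getLast _ dq2 hpwP2 lk hlk a ha
      _ < pvP nums (J + 1) := hlastP lk hlk
  · -- bound
    intro i hi
    rcases List.mem_append.1 hi with h1 | h1
    · exact le_trans (hle i (hmem1 i (hmem2 i h1))) (by omega)
    · rw [List.mem_singleton.1 h1]
  · -- soundness
    intro v hv
    rcases hsnd v hv with h1 | ⟨k, hk, hvk⟩
    · obtain ⟨i, j', hgood, hj', hvij⟩ := hsound v h1
      exact ⟨i, j', hgood, by omega, hvij⟩
    · have hkJ : k ≤ J := hle k (hmempre k hk)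
      exact ⟨k, J + 1, ⟨by omega, hJ1, hcondP k hk⟩, le_rfl, hvk⟩
  · -- completeness
    intro i j' hgood hj'
    by_cases hj'J : j' ≤ J
    · obtain ⟨v, hv, hvle⟩ := hcomp i j' hgood hj'J
      obtain ⟨v', hv', hle'⟩ := hmono v hv
      exact ⟨v', hv', le_trans hle' hvle⟩
    · have hj'eq : j' = J + 1 := by omega
      subst hj'eq
      have hiJ : i ≤ J := by have := hgood.1; omega
      rcases hcover i hiJ with ⟨k, hk, hik, hPk⟩ | ⟨k', j'', hik', hgood'', hj''⟩
      · -- k dominates i and is in the old deque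
        have hkcond : t ≤ pvP nums (J + 1) - pvP nums k := by
          have := hgood.2.2
          omega
        have hkpre : k ∈ pre := by
          rw [heq1] at hk
          rcases List.mem_append.1 hk with h1 | h1
          · exact h1
          · exfalso
            cases hd : dq1 with
            | nil => rw [hd] at h1; simp at h1
            | cons khd l =>
              rw [hd] at h1 hpwP1
              have h2 := pvHead_le (pvP nums) khd l hpwP1 k h1
              have h3 := hheadP khd l hd
              omega
        obtain ⟨v', hv', hle'⟩ := hbnd k hkpre
        refine ⟨v', hv', ?_⟩
        have : k ≤ J := hle k (hmempre k hkpre)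
        omega
      · obtain ⟨v, hv, hvle⟩ := hcomp k' j'' hgood'' hj''
        obtain ⟨v', hv', hle'⟩ := hmono v hv
        refine ⟨v', hv', ?_⟩
        have := hgood''.1
        omega
  · -- cover
    intro i hi
    by_cases hiJ : i ≤ J
    · rcases hcover i hiJ with ⟨k, hk, hik, hPk⟩ | ⟨k', j'', hik', hgood'', hj''⟩
      · rw [heq1] at hk
        rcases List.mem_append.1 hk with h1 | h1
        · -- k was front-popped: (k, J+1) is good and k ≥ i
          have hkJ : k ≤ J := hle k (by rw [heq1]; exact List.mem_append_left _ h1)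
          exact Or.inr ⟨k, J + 1, hik, ⟨by omega, hJ1, hcondP k h1⟩, le_rfl⟩
        · rw [heq2] at h1
          rcases List.mem_append.1 h1 with h2 | h2
          · -- k survives in the deque
            exact Or.inl ⟨k, List.mem_append_left _ h2, hik, hPk⟩
          · -- k was back-popped: J+1 dominates it
            refine Or.inl ⟨J + 1, List.mem_append_right _ (List.mem_singleton_self _), by omega, ?_⟩
            have := hsufP k h2
            omega
      · exact Or.inr ⟨k', j'', hik', hgood'', by omega⟩
    · have : i = J + 1 := by omega
      subst this
      exact Or.inl ⟨J + 1, List.mem_append_right _ (List.mem_singleton_self _), le_rfl, le_rfl⟩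

lemma pvInv_fold (nums : List Int) (t : Int) (n : Nat) (hn : n ≤ nums.length) :
    pvInv nums t n ((List.range' 1 n).foldl (pvStep (pvPrefix nums) t) (none, [0])) := by
  induction n with
  | zero =>
    refine ⟨List.pairwise_singleton _ _, List.pairwise_singleton _ _, ?_, ?_, ?_, ?_⟩
    · intro i hi; rw [List.mem_singleton.1 hi]
    · intro v hv; simp at hv
    · intro i j hg hj; exfalso; have := hg.1; omega
    · intro i hi
      have : i = 0 := by omega
      subst this
      exact Or.inl ⟨0, by simp, le_rfl, le_rfl⟩
  | succ n ih =>
    have hrange : List.range' 1 (n + 1) = List.range' 1 n ++ [n + 1] := by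
      rw [List.range'_concat]
      simp [Nat.add_comm]
    rw [hrange, List.foldl_append, List.foldl_cons, List.foldl_nil]
    exact pvInv_step nums t n _ (by omega) (ih (by omega))

lemma pvWindow_sum (nums : List Int) (s L : Nat) :
    ((nums.drop s).take L).sum = pvP nums (s + L) - pvP nums s := by
  have h := List.take_add (l := nums) (i := s) (j := L)
  unfold pvP
  rw [h, List.sum_append]; ring

lemma pvWindowAny_iff (nums : List Int) (t : Int) (L : Nat) (hL : L ≤ nums.length) :
    pvWindowAny nums t L = true ↔
      ∃ s, s + L ≤ nums.length ∧ t ≤ pvP nums (s + L) - pvP nums s := by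
  unfold pvWindowAny
  rw [List.any_eq_true]
  constructor
  · rintro ⟨s, hs, hdec⟩
    rw [List.mem_range] at hs
    rw [PySem.List.slice_natCast_add, decide_eq_true_eq, pvWindow_sum] at hdec
    exact ⟨s, by omega, hdec⟩
  · rintro ⟨s, hs, ht⟩
    refine ⟨s, by rw [List.mem_range]; omega, ?_⟩
    rw [PySem.List.slice_natCast_add, decide_eq_true_eq, pvWindow_sum]
    exact ht

lemma pvFindLen_none (nums : List Int) (t : Int) (L : Nat)
    (h : ∀ L', L ≤ L' → L' ≤ nums.length → pvWindowAny nums t L' ≠ true) :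
    pvFindLen nums t L = 0 := by
  rw [pvFindLen]
  by_cases hL : L ≤ nums.length
  · have hw : pvWindowAny nums t L = false := by
      have := h L le_rfl hL
      simpa using this
    rw [if_pos hL, hw]
    simp only [Bool.false_eq_true, if_false]
    exact pvFindLen_none nums t (L + 1) (fun L' h1 h2 => h L' (by omega) h2)
  · rw [if_neg hL]
termination_by nums.length + 1 - L

lemma pvFindLen_found (nums : List Int) (t : Int) (v : Nat) (L : Nat)
    (hLv : L ≤ v) (hv : v ≤ nums.length) (hw : pvWindowAny nums t v = true)
    (hmin : ∀ L', L ≤ L' → L' < v → pvWindowAny nums t L' ≠ true) :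
    pvFindLen nums t L = (v : Int) := by
  rw [pvFindLen, if_pos (by omega)]
  by_cases heq : L = v
  · subst heq; rw [hw]; simp
  · have hwf : pvWindowAny nums t L = false := by
      have := hmin L le_rfl (by omega)
      simpa using this
    rw [hwf]
    simp only [Bool.false_eq_true, if_false]
    exact pvFindLen_found nums t v (L + 1) (by omega) hv hw
      (fun L' h1 h2 => hmin L' (by omega) h2)
termination_by v - L
decreasing_by omega

-- ===== VERDICT (by name: the statement is the Claim_ definition above) =====
theorem shortest_subarray_with_sum_at_least_target_spec : Claim_equal_shortest_subarray_with_sum_at_least_target := by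
  unfold Claim_equal_shortest_subarray_with_sum_at_least_target
  intro nums t _
  unfold Spec_shortest_subarray_with_sum_at_least_target
  unfold shortest_subarray_with_sum_at_least_target shortest_subarray_with_sum_at_least_target_alt
  by_cases hany : nums.any (fun num => decide (num ≥ t)) = true
  · rw [if_pos hany]
    obtain ⟨num, hmem, hnum⟩ := List.any_eq_true.1 hany
    rw [decide_eq_true_eq] at hnum
    obtain ⟨s, hs, hsel⟩ := List.mem_iff_getElem.1 hmem
    have hw1 : pvWindowAny nums t 1 = true := by
      rw [pvWindowAny_iff nums t 1 (by omega)]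
      refine ⟨s, by omega, ?_⟩
      rw [← pvWindow_sum, List.drop_eq_getElem_cons hs]
      simpa [hsel] using hnum
    exact (pvFindLen_found nums t 1 1 le_rfl (by omega) hw1 (fun L' h1 h2 => by omega)).symm
  · rw [if_neg hany]
    simp only [pvPrefix_length, Nat.add_sub_cancel]
    have hInv := pvInv_fold nums t nums.length le_rfl
    set st := (List.range' 1 nums.length).foldl (pvStep (pvPrefix nums) t) (none, [0]) with hst
    obtain ⟨_, _, _, hsound, hcomp, _⟩ := hInv
    cases hm : st.1 with
    | none =>
      refine (pvFindLen_none nums t 1 ?_).symm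
      intro L' h1 h2 hw
      obtain ⟨s, hsL, ht⟩ := (pvWindowAny_iff nums t L' h2).1 hw
      obtain ⟨v, hv, _⟩ := hcomp s (s + L') ⟨by omega, hsL, ht⟩ (by omega)
      rw [hm] at hv
      cases hv
    | some v =>
      obtain ⟨i, j', hgood, hj', hvij⟩ := hsound v hm
      obtain ⟨hij, hjlen, hts⟩ := hgood
      have hv1 : 1 ≤ v := by omega
      have hw : pvWindowAny nums t v = true := by
        rw [pvWindowAny_iff nums t v (by omega)]
        exact ⟨i, by omega, by rwa [show i + v = j' by omega]⟩
      have hmin : ∀ L', 1 ≤ L' → L' < v → pvWindowAny nums t L' ≠ true := by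
        intro L' h1 h2 hwL
        obtain ⟨s, hsL, ht⟩ := (pvWindowAny_iff nums t L' (by omega)).1 hwL
        obtain ⟨v2, hv2, hv2le⟩ := hcomp s (s + L') ⟨by omega, hsL, ht⟩ (by omega)
        rw [hm] at hv2
        cases hv2
        omega
      simpa using (pvFindLen_found nums t v 1 hv1 (by omega) hw hmin).symm
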